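-- pv_equiv track=rewrite | github.com/LeonardoBonanno/SummerResearch2020 | Code/permsToTrees.py | convertToTreePerm
-- ===== SOURCE A (Python) =====
-- import copy
--
-- def complement(perm):
--     n = len(perm)
--     sortedElements = sorted(copy.deepcopy(perm))
--     complement = [0] * n
--     for i in range(n):
--         j = sortedElements.index(perm[i])
--         complement[i] = sortedElements[n - 1 - j]
--     return complement
--
-- def maximalElements(perm):
--     minVal = float("inf")
--     maxVal = 0
--     minIndex = 0
--     maxIndex = 0
--     for i in range(len(perm)):
--         if perm[i] < minVal:
--             minVal = perm[i]
--             minIndex = i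
--         if perm[i] > maxVal:
--             maxVal = perm[i]
--             maxIndex = i
--     return maxIndex, minIndex
--
-- def convertToTreePerm(perm):
--     if len(perm) <= 1:
--         return perm
--     maxIndex, minIndex = maximalElements(perm)
--     if minIndex < maxIndex:
--         perm = complement(perm)
--         minIndex = maxIndex
--     return convertToTreePerm(perm[0:minIndex]) + [perm[minIndex]] + convertToTreePerm(perm[minIndex + 1:])
-- ===== SOURCE B (Python) =====
-- def convertToTreePerm(perm):
--     # Iterative re-implementation: an explicit work stack of segments replaces the
--     # recursion, the result is built left-to-right into an accumulator, and the
--     # complement of a segment uses a first-occurrence rank table built once from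
--     # the sorted segment instead of repeated list.index scans.
--     out = []
--     stack = [('seg', list(perm))]
--     while stack:
--         kind, item = stack.pop()
--         if kind == 'val':
--             out.append(item)
--             continue
--         seg = item
--         if len(seg) <= 1:
--             out.extend(seg)
--             continue
--         minV = None
--         maxV = 0
--         minIdx = 0
--         maxIdx = 0
--         for i, v in enumerate(seg):
--             if minV is None or v < minV:
--                 minV, minIdx = v, i
--             if v > maxV:
--                 maxV, maxIdx = v, i
--         pivot = minIdx
--         if minIdx < maxIdx:
--             srt = sorted(seg)
--             rank = {}
--             for j, v in enumerate(srt):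
--                 if v not in rank:
--                     rank[v] = j
--             n = len(seg)
--             seg = [srt[n - 1 - rank[v]] for v in seg]
--             pivot = maxIdx
--         stack.append(('seg', seg[pivot + 1:]))
--         stack.append(('val', seg[pivot]))
--         stack.append(('seg', seg[:pivot]))
--     return out
-- ===== Notes on version B (the rewrite author's own statement) =====
-- stated objective: alternative
-- what changed: Replaces A's recursion-with-slicing-and-concatenation by an iterative explicit work stack that emits the result left-to-right into an accumulator, and computes each complement through a first-occurrence rank table built once from the sorted segment instead of a repeated list.index scan per element.
import Mathlib
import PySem

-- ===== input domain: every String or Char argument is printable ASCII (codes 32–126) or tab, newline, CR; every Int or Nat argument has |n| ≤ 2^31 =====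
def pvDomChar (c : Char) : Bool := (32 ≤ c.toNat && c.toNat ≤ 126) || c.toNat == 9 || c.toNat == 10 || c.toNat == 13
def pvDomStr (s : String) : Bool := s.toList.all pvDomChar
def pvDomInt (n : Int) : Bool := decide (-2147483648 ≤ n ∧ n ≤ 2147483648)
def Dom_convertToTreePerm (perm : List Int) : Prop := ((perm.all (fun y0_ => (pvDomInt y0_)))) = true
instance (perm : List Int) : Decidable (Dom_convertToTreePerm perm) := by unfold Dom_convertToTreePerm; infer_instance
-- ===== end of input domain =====

-- B replaces A's recursion-with-slicing by an explicit work stack with an output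
-- accumulator and computes each complement via a first-occurrence rank table built
-- once from the sorted segment instead of repeated list.index scans (objective: alternative).


-- ===== PORT A =====

-- complement(perm): sortedElements = sorted(perm); out[i] = sortedElements[n-1-index(perm[i])]
-- (sortedElements.index / sortedElements[...] always succeed here, so .getD only covers unreachable branches)
def pyComplement (perm : List Int) : List Int :=
  let n := perm.length
  let sortedElements := PySem.List.sorted perm (fun x => x) false
  (List.range n).map (fun i =>
    let j := (PySem.List.index? sortedElements (perm.getD i 0)).getD 0
    sortedElements.getD (n - 1 - j) 0)

-- one iteration of maximalElements' loop; state = (minVal (none = +inf), maxVal, minIndex, maxIndex)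
def pyMMStep (perm : List Int) (st : Option Int × Int × Nat × Nat) (i : Nat) :
    Option Int × Int × Nat × Nat :=
  let v := perm.getD i 0
  let updMin : Bool := match st.1 with | none => true | some m => decide (v < m)
  let minVal := if updMin then some v else st.1
  let minIndex := if updMin then i else st.2.2.1
  let updMax : Bool := decide (st.2.1 < v)
  let maxVal := if updMax then v else st.2.1
  let maxIndex := if updMax then i else st.2.2.2
  (minVal, maxVal, minIndex, maxIndex)

def pyMaximalElements (perm : List Int) : Nat × Nat :=
  let st := (List.range perm.length).foldl (pyMMStep perm) (none, 0, 0, 0)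
  (st.2.2.2, st.2.2.1)

-- A's two reassignment lines: 'perm = complement(perm); minIndex = maxIndex' (when minIndex < maxIndex)
def pyPivot (perm : List Int) : List Int × Nat :=
  let mm := pyMaximalElements perm
  if mm.2 < mm.1 then (pyComplement perm, mm.1) else (perm, mm.2)

theorem pyComplement_length (perm : List Int) : (pyComplement perm).length = perm.length := by
  simp [pyComplement]

theorem pyMM_inv (perm : List Int) (n : Nat) :
    ∀ (l : List Nat), (∀ i ∈ l, i < n) → ∀ (st : Option Int × Int × Nat × Nat),
      st.2.2.1 < n → st.2.2.2 < n →
      (l.foldl (pyMMStep perm) st).2.2.1 < n ∧ (l.foldl (pyMMStep perm) st).2.2.2 < n := by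
  intro l
  induction l with
  | nil => intro _ st h1 h2; exact ⟨h1, h2⟩
  | cons x xs ih =>
    intro hall st h1 h2
    rw [List.foldl_cons]
    refine ih (fun i hi => hall i (List.mem_cons_of_mem _ hi)) (pyMMStep perm st x) ?_ ?_ <;>
      (obtain ⟨a, b, c, d⟩ := st
       have hx := hall x List.mem_cons_self
       simp only [pyMMStep]
       (repeat' split) <;> first | exact hx | exact h1 | exact h2)

theorem pyMaximalElements_lt (perm : List Int) (h : 0 < perm.length) :
    (pyMaximalElements perm).1 < perm.length ∧ (pyMaximalElements perm).2 < perm.length := by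
  have := pyMM_inv perm perm.length (List.range perm.length)
    (by intro i hi; exact List.mem_range.mp hi) (none, 0, 0, 0) h h
  simpa [pyMaximalElements] using ⟨this.2, this.1⟩

theorem pyPivot_length (perm : List Int) : (pyPivot perm).1.length = perm.length := by
  simp only [pyPivot]; split <;> simp [pyComplement_length]

theorem pyPivot_lt (perm : List Int) (h : 0 < perm.length) : (pyPivot perm).2 < perm.length := by
  have := pyMaximalElements_lt perm h
  simp only [pyPivot]; split
  · exact this.1
  · exact this.2

def convertToTreePerm (perm : List Int) : List Int :=
  if _h : perm.length ≤ 1 then perm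
  else
    let pm := pyPivot perm
    convertToTreePerm (PySem.List.slice pm.1 (some 0) (some (pm.2 : Int)))
      ++ [pm.1.getD pm.2 0]
      ++ convertToTreePerm (PySem.List.slice pm.1 (some ((pm.2 : Int) + 1)) none)
termination_by perm.length
decreasing_by
  · have hl := pyPivot_length perm
    have hlt := pyPivot_lt perm (by omega)
    rw [PySem.List.slice_zero_start, PySem.List.slice_to_natCast]
    simp only [List.length_take]
    omega
  · have hl := pyPivot_length perm
    have hlt := pyPivot_lt perm (by omega)
    have : ((pyPivot perm).2 : Int) + 1 = (((pyPivot perm).2 + 1 : Nat) : Int) := by push_cast; ring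
    rw [this, PySem.List.slice_from_natCast]
    simp only [List.length_drop]
    omega

-- ===== PORT B =====

inductive PVItem where
  | seg : List Int → PVItem
  | val : Int → PVItem
deriving DecidableEq, Repr

-- one iteration of B's min/max scan; state = (minV, maxV, minIdx, maxIdx)
def pvScanStep (st : Option Int × Int × Int × Int) (iv : Int × Int) :
    Option Int × Int × Int × Int :=
  let updMin : Bool := match st.1 with | none => true | some m => decide (iv.2 < m)
  let minV := if updMin then some iv.2 else st.1
  let minIdx := if updMin then iv.1 else st.2.2.1
  let updMax : Bool := decide (st.2.1 < iv.2)
  let maxV := if updMax then iv.2 else st.2.1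
  let maxIdx := if updMax then iv.1 else st.2.2.2
  (minV, maxV, minIdx, maxIdx)

def pvScan (seg : List Int) : Int × Int :=
  let st := (PySem.List.enumerate seg 0).foldl pvScanStep (none, 0, 0, 0)
  (st.2.2.1, st.2.2.2)

-- 'if v not in rank: rank[v] = j'
def pvRankStep (r : PySem.Dict Int Int) (jv : Int × Int) : PySem.Dict Int Int :=
  if r.contains jv.2 then r else r.insert jv.2 jv.1

def pvComplB (seg : List Int) : List Int :=
  let srt := PySem.List.sorted seg (fun x => x) false
  let rank := (PySem.List.enumerate srt 0).foldl pvRankStep PySem.Dict.empty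
  let n := seg.length
  seg.map (fun v => PySem.List.pyGetD srt ((n : Int) - 1 - rank.getD v 0) 0)

theorem pvComplB_length (seg : List Int) : (pvComplB seg).length = seg.length := by
  simp [pvComplB]

def pvWeight : PVItem → Nat
  | .seg l => 3 * l.length + 1
  | .val _ => 1

-- B's scan computes A's maximalElements (indices as Python ints)
theorem pvScanStep_rel (perm : List Int) (st : Option Int × Int × Nat × Nat) (k : Nat) :
    pvScanStep (st.1, st.2.1, (st.2.2.1 : Int), (st.2.2.2 : Int)) ((k : Int), perm.getD k 0)
      = ((pyMMStep perm st k).1, (pyMMStep perm st k).2.1,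
         ((pyMMStep perm st k).2.2.1 : Int), ((pyMMStep perm st k).2.2.2 : Int)) := by
  simp only [pvScanStep, pyMMStep]
  obtain ⟨a, b, c, d⟩ := st
  split <;> split <;> split <;> rfl

theorem pvScan_eq (seg : List Int) :
    pvScan seg = (((pyMaximalElements seg).2 : Int), ((pyMaximalElements seg).1 : Int)) := by
  have henum : PySem.List.enumerate seg 0
      = (List.range seg.length).map (fun (k : Nat) => ((k : Int), seg.getD k 0)) := by
    rw [PySem.List.enumerate_eq_map_pyRange seg 0]
    simp only [PySem.List.len]
    rw [PySem.List.pyRange_zero_natCast, List.map_map]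
    refine List.map_congr_left (fun k _ => ?_)
    simp [PySem.List.pyGetD_natCast]
  have hfold : ((List.range seg.length).map (fun (k : Nat) => ((k : Int), seg.getD k 0))).foldl
        pvScanStep ((none : Option Int), (0 : Int), (0 : Int), (0 : Int))
      = (((List.range seg.length).foldl (pyMMStep seg) (none, 0, 0, 0)).1,
         ((List.range seg.length).foldl (pyMMStep seg) (none, 0, 0, 0)).2.1,
         (((List.range seg.length).foldl (pyMMStep seg) (none, 0, 0, 0)).2.2.1 : Int),
         (((List.range seg.length).foldl (pyMMStep seg) (none, 0, 0, 0)).2.2.2 : Int)) := by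
    rw [List.foldl_map]
    exact List.foldl_hom
      (f := fun (s : Option Int × Int × Nat × Nat) => (s.1, s.2.1, (s.2.2.1 : Int), (s.2.2.2 : Int)))
      (g₁ := pyMMStep seg)
      (g₂ := fun st (k : Nat) => pvScanStep st ((k : Int), seg.getD k 0))
      (l := List.range seg.length)
      (init := (none, 0, 0, 0))
      (fun st k => (pvScanStep_rel seg st k))
  simp only [pvScan, henum, hfold, pyMaximalElements]

theorem pvScan_bounds (seg : List Int) (h : 0 < seg.length) :
    (0 ≤ (pvScan seg).1 ∧ (pvScan seg).1 < (seg.length : Int)) ∧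
    (0 ≤ (pvScan seg).2 ∧ (pvScan seg).2 < (seg.length : Int)) := by
  have hmm := pyMaximalElements_lt seg h
  rw [pvScan_eq]
  exact ⟨⟨by simp, by simpa using hmm.2⟩, by simp, by simpa using hmm.1⟩

theorem pvLoop_dec (seg seg' : List Int) (pivot x : Int) (rest : List PVItem)
    (hlen : seg'.length = seg.length) (hp0 : 0 ≤ pivot) (hplt : pivot < (seg.length : Int)) :
    (List.map pvWeight (PVItem.seg (PySem.List.slice seg' none (some pivot))
      :: PVItem.val x :: PVItem.seg (PySem.List.slice seg' (some (pivot + 1)) none) :: rest)).sum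
    < (List.map pvWeight (PVItem.seg seg :: rest)).sum := by
  obtain ⟨pn, hpn⟩ : ∃ pn : Nat, pivot = (pn : Int) := ⟨pivot.toNat, (Int.toNat_of_nonneg hp0).symm⟩
  have hpnlt : pn < seg.length := by omega
  have h1 : pivot + 1 = ((pn + 1 : Nat) : Int) := by omega
  rw [h1, hpn, PySem.List.slice_from_natCast, PySem.List.slice_to_natCast]
  simp only [List.map_cons, List.sum_cons, pvWeight, List.length_drop, List.length_take, hlen]
  omega

def pvLoop : List PVItem → List Int → List Int
  | [], out => out
  | .val v :: rest, out => pvLoop rest (out ++ [v])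
  | .seg seg :: rest, out =>
    if h : seg.length ≤ 1 then pvLoop rest (out ++ seg)
    else
      let sc := pvScan seg
      let seg' := if sc.1 < sc.2 then pvComplB seg else seg
      let pivot := if sc.1 < sc.2 then sc.2 else sc.1
      pvLoop (PVItem.seg (PySem.List.slice seg' none (some pivot))
              :: PVItem.val (PySem.List.pyGetD seg' pivot 0)
              :: PVItem.seg (PySem.List.slice seg' (some (pivot + 1)) none) :: rest) out
termination_by stack _ => (stack.map pvWeight).sum
decreasing_by
  · simp only [List.map_cons, List.sum_cons, pvWeight]
    omega
  · simp only [List.map_cons, List.sum_cons, pvWeight]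
    omega
  · have hb := pvScan_bounds seg (by omega)
    refine pvLoop_dec seg _ _ _ rest ?_ ?_ ?_
    · split <;> simp [pvComplB_length]
    · split
      · exact hb.2.1
      · exact hb.1.1
    · split
      · exact hb.2.2
      · exact hb.1.2

def convertToTreePerm_alt (perm : List Int) : List Int := pvLoop [PVItem.seg perm] []

-- ===== PRECONDITION & SPEC =====
def Spec_convertToTreePerm (perm : List Int) (out : List Int) : Prop := out = convertToTreePerm_alt perm
instance (perm : List Int) (out : List Int) : Decidable (Spec_convertToTreePerm perm out) := by unfold Spec_convertToTreePerm; infer_instance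

-- ===== CLAIM (what is proved, stated in full; the proofs are below) =====
def Claim_equal_convertToTreePerm : Prop := ∀ (perm : List Int), Dom_convertToTreePerm perm → Spec_convertToTreePerm perm (convertToTreePerm perm)

-- ===== LEMMAS AND PROOFS =====

-- the first-occurrence rank table agrees with sorted.index
theorem pvRank_getD (l : List Int) :
    ∀ (s : Int) (d : PySem.Dict Int Int) (v : Int),
      ((PySem.List.enumerate l s).foldl pvRankStep d).getD v 0
        = if d.contains v then d.getD v 0
          else (match PySem.List.index? l v with | some j => s + (j : Int) | none => 0) := by
  induction l with
  | nil =>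
    intro s d v
    simp only [PySem.List.enumerate_nil, List.foldl_nil]
    by_cases h : d.contains v
    · simp [h]
    · have hix : PySem.List.index? ([] : List Int) v = none := by
        rw [PySem.List.index?_eq_none_iff]; simp
      have hg : d.getD v 0 = 0 := PySem.Dict.getD_of_not_contains d 0 (by simpa using h)
      simp [h, hg]
  | cons x xs ih =>
    intro s d v
    rw [PySem.List.enumerate_cons, List.foldl_cons]
    by_cases hdx : d.contains x
    · have hstep : pvRankStep d (s, x) = d := by simp [pvRankStep, hdx]
      rw [hstep, ih (s + 1) d v]
      by_cases hdv : d.contains v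
      · simp [hdv]
      · have hvx : v ≠ x := fun he => hdv (he ▸ hdx)
        rw [PySem.List.index?_cons_of_ne xs (Ne.symm hvx)]
        cases hix : PySem.List.index? xs v <;> simp [hdv] <;> ring
    · have hstep : pvRankStep d (s, x) = d.insert x s := by simp [pvRankStep, hdx]
      rw [hstep, ih (s + 1) (d.insert x s) v]
      by_cases hvx : v = x
      · subst hvx
        have h1 : (d.insert v s).contains v = true := by
          rw [PySem.Dict.contains_insert]; simp
        have h2 : PySem.List.index? (v :: xs) v = some 0 :=
          (PySem.List.index?_eq_some_iff _ _ _).mpr ⟨[], xs, by simp⟩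
        rw [h2]
        simp [h1, hdx]
      · have h1 : (d.insert x s).contains v = d.contains v := by
          rw [PySem.Dict.contains_insert]; simp [hvx]
        rw [h1]
        by_cases hdv : d.contains v
        · simp [hdv, PySem.Dict.getD_insert, hvx]
        · rw [PySem.List.index?_cons_of_ne xs (Ne.symm hvx)]
          cases hix : PySem.List.index? xs v <;> simp [hdv] <;> ring

-- B's rank-table complement computes A's complement
theorem pvComplB_eq (seg : List Int) : pvComplB seg = pyComplement seg := by
  simp only [pvComplB, pyComplement]
  have hmapr : ∀ (f : Int → Int),
      (List.range seg.length).map (fun i => f (seg.getD i 0)) = seg.map f := by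
    intro f
    induction seg using List.reverseRecOn with
    | nil => simp
    | append_singleton xs x ihx =>
      simp only [List.length_append, List.length_cons, List.length_nil]
      rw [List.range_succ, List.map_append]
      have e1 : List.map (fun i => f ((xs ++ [x]).getD i 0)) (List.range xs.length)
          = List.map (fun i => f (xs.getD i 0)) (List.range xs.length) :=
        List.map_congr_left (fun i hi => by
          rw [List.getD_append _ _ _ _ (List.mem_range.mp hi)])
      rw [e1, ihx]
      simp
  rw [← hmapr]
  refine List.map_congr_left (fun i hi => ?_)
  have hi' : i < seg.length := List.mem_range.mp hi
  set srt := PySem.List.sorted seg (fun x => x) false with hsrt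
  have hlen : srt.length = seg.length := PySem.List.length_sorted seg _ _
  have hmem : seg.getD i 0 ∈ srt := by
    rw [hsrt, PySem.List.mem_sorted]
    rw [List.getD_eq_getElem seg 0 hi']
    exact List.getElem_mem hi'
  obtain ⟨j, hj⟩ : ∃ j, PySem.List.index? srt (seg.getD i 0) = some j := by
    have := (PySem.List.index?_isSome_iff srt (seg.getD i 0)).mpr hmem
    exact Option.isSome_iff_exists.mp this
  obtain ⟨hjlt, -, -⟩ := PySem.List.getElem_of_index?_eq_some hj
  have hrank : ((PySem.List.enumerate srt 0).foldl pvRankStep PySem.Dict.empty).getD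
      (seg.getD i 0) 0 = (j : Int) := by
    rw [pvRank_getD srt 0 PySem.Dict.empty (seg.getD i 0)]
    rw [if_neg (by simp [PySem.Dict.contains_empty]), hj]
    simp
  rw [hrank, hj]
  have hc : (seg.length : Int) - 1 - (j : Int) = ((seg.length - 1 - j : Nat) : Int) := by
    omega
  rw [hc, PySem.List.pyGetD_natCast]
  simp

-- A's one-step unfolding, phrased with B's stack ingredients
theorem convertToTreePerm_step (seg : List Int) (h : ¬ seg.length ≤ 1) :
    convertToTreePerm seg
      = convertToTreePerm (PySem.List.slice (pyPivot seg).1 none (some ((pyPivot seg).2 : Int)))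
        ++ [(pyPivot seg).1.getD (pyPivot seg).2 0]
        ++ convertToTreePerm (PySem.List.slice (pyPivot seg).1 (some (((pyPivot seg).2 : Int) + 1)) none) := by
  rw [convertToTreePerm]
  simp only [h, dite_false, PySem.List.slice_zero_start]

def pvItemOut : PVItem → List Int
  | .seg s => convertToTreePerm s
  | .val v => [v]

theorem pvLoop_eq : ∀ (stack : List PVItem) (out : List Int),
    pvLoop stack out = out ++ (stack.map pvItemOut).flatten := by
  intro stack out
  induction stack, out using pvLoop.induct with
  | case1 out => simp [pvLoop]
  | case2 v rest out ih =>
    rw [pvLoop, ih]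
    simp [pvItemOut]
  | case3 seg rest out h ih =>
    rw [pvLoop]
    simp only [h, dite_true, ih]
    have : convertToTreePerm seg = seg := by
      rw [convertToTreePerm]; simp [h]
    simp [pvItemOut, this]
  | case4 seg rest out h sc seg' pivot ih =>
    have hsc : sc = (((pyMaximalElements seg).2 : Int), ((pyMaximalElements seg).1 : Int)) :=
      pvScan_eq seg
    have hseg' : seg' = (pyPivot seg).1 := by
      show (if h : sc.1 < sc.2 then pvComplB seg else seg) = _
      rw [hsc]; dsimp only
      by_cases hc : (pyMaximalElements seg).2 < (pyMaximalElements seg).1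
      · rw [dif_pos (by exact_mod_cast hc)]
        simp [pyPivot, hc, pvComplB_eq]
      · rw [dif_neg (by exact_mod_cast hc)]
        simp [pyPivot, hc]
    have hpivot : pivot = ((pyPivot seg).2 : Int) := by
      show (if h : sc.1 < sc.2 then sc.2 else sc.1) = _
      rw [hsc]; dsimp only
      by_cases hc : (pyMaximalElements seg).2 < (pyMaximalElements seg).1
      · rw [dif_pos (by exact_mod_cast hc)]
        simp [pyPivot, hc]
      · rw [dif_neg (by exact_mod_cast hc)]
        simp [pyPivot, hc]
    rw [pvLoop]
    simp only [h, dite_false]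
    refine ih.trans ?_
    rw [hseg', hpivot, PySem.List.pyGetD_natCast]
    simp [pvItemOut, convertToTreePerm_step seg h]

-- ===== VERDICT (by name: the statement is the Claim_ definition above) =====
theorem convertToTreePerm_spec : Claim_equal_convertToTreePerm := by
  intro perm _
  unfold Spec_convertToTreePerm convertToTreePerm_alt
  rw [pvLoop_eq]
  simp [pvItemOut]
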